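-- pv_equiv track=rewrite | github.com/golupankajgoyal/Pythonist | venv/Dynamic Programming/CSES DP Solutions.py | dice_combinations
-- ===== SOURCE A (Python) =====
-- def dice_combinations(num,dp):
--     if num<0:
--         return 0
--     if num==0:
--         return 1
--     if dp[num]!=-1:
--         return dp[num]
--     ans=0
--     for  i in range(1,7):
--         ans+=dice_combinations(num-i,dp)
--     dp[num]=ans
--     return ans
-- ===== SOURCE B (Python) =====
-- def dice_combinations(num, dp):
--     # Bottom-up forward pass over the same recurrence (A memoizes top-down and
--     # mutates dp; B keeps its own table and leaves dp untouched -- the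
--     # equivalence claimed is about the RETURN value only).
--     if num < 0:
--         return 0
--     val = [1]
--     for i in range(1, num + 1):
--         v = dp[i]
--         if v == -1:
--             v = sum(val[i - j] for j in range(1, 7) if i - j >= 0)
--         val.append(v)
--     return val[num]
-- ===== Notes on version B (the rewrite author's own statement) =====
-- stated objective: alternative
-- what changed: Replaces the top-down memoized recursion (which caches into the dp argument) with an iterative bottom-up pass that builds its own value table and never mutates dp.
import Mathlib
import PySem

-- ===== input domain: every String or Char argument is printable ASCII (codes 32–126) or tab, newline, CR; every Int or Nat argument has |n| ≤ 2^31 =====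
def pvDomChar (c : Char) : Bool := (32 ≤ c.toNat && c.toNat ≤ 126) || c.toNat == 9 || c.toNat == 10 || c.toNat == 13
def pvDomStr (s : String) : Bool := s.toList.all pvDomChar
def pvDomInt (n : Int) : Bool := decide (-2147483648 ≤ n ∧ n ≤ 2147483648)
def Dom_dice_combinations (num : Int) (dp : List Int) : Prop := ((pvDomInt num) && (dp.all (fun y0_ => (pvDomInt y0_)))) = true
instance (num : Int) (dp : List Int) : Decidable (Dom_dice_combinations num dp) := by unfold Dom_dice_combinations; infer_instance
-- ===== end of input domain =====

-- B replaces A's top-down memoized recursion (which writes its cache into the dp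
-- argument) with a bottom-up forward pass over its own table; B does not mutate dp,
-- so the equivalence claimed here is about the RETURN value only.

-- termination helper cited by the ports' decreasing_by (kept small on purpose)
lemma pvDecStep (num k : Int) (h0 : ¬ num < 0) (h1 : ¬ num = 0) (hk : 1 ≤ k) :
    (num - k).toNat < num.toNat := by
  have h2 : 0 < num := lt_of_le_of_ne (not_lt.mp h0) (Ne.symm h1)
  have h3 : num - k < num := sub_lt_self num (lt_of_lt_of_le one_pos hk)
  exact (Int.toNat_lt_toNat h2).mpr h3

-- ===== PORT A =====
-- Threads the mutated dp list through the recursion; the fixed six-iteration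
-- 'for i in range(1,7)' loop is unrolled into its six sequential steps.
-- pyGetD/pySetD default where Python raises IndexError; Pre_ excludes those inputs.
def diceAuxA (num : Int) (dp : List Int) : Int × List Int :=
  if num < 0 then (0, dp)
  else if num = 0 then (1, dp)
  else
    let v := PySem.List.pyGetD dp num 0
    if v ≠ -1 then (v, dp)
    else
      let p1 := diceAuxA (num - 1) dp
      let p2 := diceAuxA (num - 2) p1.2
      let p3 := diceAuxA (num - 3) p2.2
      let p4 := diceAuxA (num - 4) p3.2
      let p5 := diceAuxA (num - 5) p4.2
      let p6 := diceAuxA (num - 6) p5.2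
      let ans := 0 + p1.1 + p2.1 + p3.1 + p4.1 + p5.1 + p6.1
      (ans, PySem.List.pySetD p6.2 num ans)
termination_by num.toNat
decreasing_by all_goals exact pvDecStep _ _ (by assumption) (by assumption) (by norm_num)

def dice_combinations (num : Int) (dp : List Int) : Int :=
  (diceAuxA num dp).1

-- ===== PORT B =====
def dice_combinations_alt (num : Int) (dp : List Int) : Int :=
  if num < 0 then 0
  else
    let val := (PySem.List.pyRange 1 (num + 1) 1).foldl
      (fun val i =>
        let v := PySem.List.pyGetD dp i 0
        let v := if v = -1 then
            (PySem.List.pyRange 1 7 1).foldl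
              (fun s j => if 0 ≤ i - j then s + PySem.List.pyGetD val (i - j) 0 else s) 0
          else v
        val ++ [v]) [1]
    PySem.List.pyGetD val num 0

-- ===== PRECONDITION & SPEC =====
-- Pre_ excludes exactly the inputs on which Python A raises IndexError: num ≥ 1 with dp of length ≤ num.
def Pre_dice_combinations (num : Int) (dp : List Int) : Prop := 0 < num → num < (dp.length : Int)
instance (num : Int) (dp : List Int) : Decidable (Pre_dice_combinations num dp) := by
  unfold Pre_dice_combinations; infer_instance

def pvWitness_dice_combinations : Int × List Int := (3, [-1, -1, -1, -1])

def Spec_dice_combinations (num : Int) (dp : List Int) (out : Int) : Prop := out = dice_combinations_alt num dp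
instance (num : Int) (dp : List Int) (out : Int) : Decidable (Spec_dice_combinations num dp out) := by unfold Spec_dice_combinations; infer_instance

-- ===== CLAIM (what is proved, stated in full; the proofs are below) =====
def Claim_equal_dice_combinations : Prop := ∀ (num : Int) (dp : List Int), Dom_dice_combinations num dp → Pre_dice_combinations num dp → Spec_dice_combinations num dp (dice_combinations num dp)

-- ===== LEMMAS AND PROOFS =====

-- The pure value of the recurrence relative to the ORIGINAL dp.
def gpure (dp : List Int) (n : Int) : Int :=
  if n < 0 then 0
  else if n = 0 then 1
  else
    let v := PySem.List.pyGetD dp n 0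
    if v ≠ -1 then v
    else gpure dp (n - 1) + gpure dp (n - 2) + gpure dp (n - 3) +
         gpure dp (n - 4) + gpure dp (n - 5) + gpure dp (n - 6)
termination_by n.toNat
decreasing_by all_goals exact pvDecStep _ _ (by assumption) (by assumption) (by norm_num)

lemma pyGetD_nonneg_getD (xs : List Int) (i : Int) (d : Int) (h : 0 ≤ i) :
    PySem.List.pyGetD xs i d = xs.getD i.toNat d := by
  have h2 : i = ((i.toNat : Nat) : Int) := by omega
  rw [h2, PySem.List.pyGetD_natCast, Int.toNat_natCast]

-- dp1 is a consistent memo-extension of dp0.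
def MemoExt (dp0 dp1 : List Int) : Prop :=
  dp1.length = dp0.length ∧
  ∀ k : Nat, k < dp0.length →
    dp1.getD k 0 = dp0.getD k 0 ∨ (dp0.getD k 0 = -1 ∧ dp1.getD k 0 = gpure dp0 k)

lemma gpure_of_cached (dp0 : List Int) (n : Int) (h0 : ¬ n < 0) (h1 : ¬ n = 0)
    (hm : dp0.getD n.toNat 0 ≠ -1) : gpure dp0 n = dp0.getD n.toNat 0 := by
  rw [gpure]
  simp only [if_neg h0, if_neg h1, pyGetD_nonneg_getD dp0 n 0 (by omega)]
  rw [List.getD_eq_getElem?_getD] at hm ⊢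
  simp [hm]

lemma gpure_of_uncached (dp0 : List Int) (n : Int) (h0 : ¬ n < 0) (h1 : ¬ n = 0)
    (hm : dp0.getD n.toNat 0 = -1) :
    gpure dp0 n = gpure dp0 (n - 1) + gpure dp0 (n - 2) + gpure dp0 (n - 3) +
      gpure dp0 (n - 4) + gpure dp0 (n - 5) + gpure dp0 (n - 6) := by
  rw [gpure]
  simp only [if_neg h0, if_neg h1, pyGetD_nonneg_getD dp0 n 0 (by omega)]
  rw [List.getD_eq_getElem?_getD] at hm
  simp [hm]

-- the recursive (cache-miss) case of diceAuxA, abstracted over the induction hypothesis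
lemma diceAuxA_rec_case (dp0 : List Int) (f : Nat)
    (ih : ∀ (n : Int) (dp1 : List Int), n.toNat ≤ f → MemoExt dp0 dp1 →
      (diceAuxA n dp1).1 = gpure dp0 n ∧ MemoExt dp0 (diceAuxA n dp1).2)
    (n : Int) (dp1 : List Int) (hf : n.toNat ≤ f + 1) (hx : MemoExt dp0 dp1)
    (h0 : ¬ n < 0) (h1 : ¬ n = 0) (hlen : n.toNat < dp0.length)
    (hm : dp1.getD n.toNat 0 = -1) (hv0m : dp0.getD n.toNat 0 = -1) :
    (diceAuxA n dp1).1 = gpure dp0 n ∧ MemoExt dp0 (diceAuxA n dp1).2 := by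
  obtain ⟨H11, H12⟩ := ih (n - 1) dp1 (by omega) hx
  obtain ⟨H21, H22⟩ := ih (n - 2) (diceAuxA (n - 1) dp1).2 (by omega) H12
  obtain ⟨H31, H32⟩ := ih (n - 3) (diceAuxA (n - 2) (diceAuxA (n - 1) dp1).2).2 (by omega) H22
  obtain ⟨H41, H42⟩ := ih (n - 4) _ (by omega) H32
  obtain ⟨H51, H52⟩ := ih (n - 5) _ (by omega) H42
  obtain ⟨H61, H62⟩ := ih (n - 6) _ (by omega) H52
  rw [diceAuxA]
  simp only [if_neg h0, if_neg h1, pyGetD_nonneg_getD dp1 n 0 (by omega), hm]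
  norm_num
  rw [H11, H21, H31, H41, H51, H61]
  have hans : gpure dp0 (n-1) + gpure dp0 (n-2) + gpure dp0 (n-3) + gpure dp0 (n-4) +
      gpure dp0 (n-5) + gpure dp0 (n-6) = gpure dp0 n :=
    (gpure_of_uncached dp0 n h0 h1 hv0m).symm
  constructor
  · exact hans
  · -- the final write dp[num] = ans preserves MemoExt
    rw [PySem.List.pySetD_of_nonneg _ _ (by omega)]
    obtain ⟨hl6, he6⟩ := H62
    constructor
    · rw [List.length_set, hl6]
    · intro k hk
      by_cases hkn : k = n.toNat
      · right
        subst hkn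
        refine ⟨hv0m, ?_⟩
        rw [List.getD_eq_getElem?_getD, List.getElem?_set_self (by omega)]
        simp only [Option.getD_some]
        rw [hans]
        congr 1
        omega
      · rw [List.getD_eq_getElem?_getD, List.getElem?_set_ne (by omega),
            ← List.getD_eq_getElem?_getD]
        exact he6 k hk

lemma diceAuxA_eq (dp0 : List Int) :
    ∀ (fuel : Nat) (n : Int) (dp1 : List Int), n.toNat ≤ fuel → MemoExt dp0 dp1 →
      (diceAuxA n dp1).1 = gpure dp0 n ∧ MemoExt dp0 (diceAuxA n dp1).2 := by
  intro fuel
  induction fuel with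
  | zero =>
      intro n dp1 hf hx
      have hn : n ≤ 0 := by omega
      rw [diceAuxA, gpure]
      by_cases h0 : n < 0
      · simp [h0, hx]
      · have hz : n = 0 := by omega
        simp [hz, hx]
  | succ f ih =>
      intro n dp1 hf hx
      by_cases h0 : n < 0
      · rw [diceAuxA, gpure]; simp [h0, hx]
      by_cases h1 : n = 0
      · rw [diceAuxA, gpure]; simp [h1, hx]
      by_cases hlen : n.toNat < dp0.length
      case neg =>
        -- out of range (outside Pre_): both reads default to 0 ≠ -1
        have e1 : dp1.getD n.toNat 0 = 0 := List.getD_eq_default _ _ (by have := hx.1; omega)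
        have e0 : dp0.getD n.toNat 0 = 0 := List.getD_eq_default _ _ (by omega)
        rw [diceAuxA, gpure]
        simp only [if_neg h0, if_neg h1, pyGetD_nonneg_getD dp1 n 0 (by omega),
          pyGetD_nonneg_getD dp0 n 0 (by omega), e1, e0]
        norm_num
        exact hx
      case pos =>
      rcases hx.2 n.toNat hlen with hsame | ⟨hm0, hmg⟩
      · by_cases hm : dp1.getD n.toNat 0 = -1
        · exact diceAuxA_rec_case dp0 f ih n dp1 hf hx h0 h1 hlen hm (hsame ▸ hm)
        · rw [diceAuxA]
          simp only [if_neg h0, if_neg h1, pyGetD_nonneg_getD dp1 n 0 (by omega)]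
          rw [if_pos hm]
          refine ⟨?_, hx⟩
          rw [hsame, (gpure_of_cached dp0 n h0 h1 (hsame ▸ hm)).symm]
      · by_cases hm : dp1.getD n.toNat 0 = -1
        · exact diceAuxA_rec_case dp0 f ih n dp1 hf hx h0 h1 hlen hm hm0
        · rw [diceAuxA]
          simp only [if_neg h0, if_neg h1, pyGetD_nonneg_getD dp1 n 0 (by omega)]
          rw [if_pos hm]
          refine ⟨?_, hx⟩
          rw [hmg, show ((n.toNat : Nat) : Int) = n from by omega]

-- ===== B side =====

lemma foldB (dp : List Int) (m : Nat) :
    (PySem.List.pyRange 1 ((m : Int) + 1) 1).foldl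
      (fun val i =>
        let v := PySem.List.pyGetD dp i 0
        let v := if v = -1 then
            (PySem.List.pyRange 1 7 1).foldl
              (fun s j => if 0 ≤ i - j then s + PySem.List.pyGetD val (i - j) 0 else s) 0
          else v
        val ++ [v]) [1]
    = (List.range (m + 1)).map (fun k : Nat => gpure dp (k : Int)) := by
  induction m with
  | zero =>
      rw [show PySem.List.pyRange 1 (((0 : Nat) : Int) + 1) 1 = [] from
        PySem.List.pyRange_one_eq_nil (by norm_num)]
      simp [List.range_succ]
      rw [gpure]; simp
  | succ m ih =>
      have hsplit : PySem.List.pyRange 1 ((↑(m + 1) : Int) + 1) 1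
          = PySem.List.pyRange 1 ((m : Int) + 1) 1 ++ [((m : Int) + 1)] := by
        push_cast
        rw [← PySem.List.pyRange_one_succ_right (by omega)]
      rw [hsplit, List.foldl_append, ih]
      simp only [List.foldl_cons, List.foldl_nil]
      set i : Int := (m : Int) + 1 with hi
      set val : List Int := (List.range (m + 1)).map (fun k : Nat => gpure dp (k : Int)) with hval
      have hvlen : val.length = m + 1 := by simp [hval]
      have hvget : ∀ j : Int, 0 ≤ j → j ≤ (m : Int) → PySem.List.pyGetD val j 0 = gpure dp j := by
        intro j hj1 hj2
        rw [pyGetD_nonneg_getD val j 0 hj1, hval]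
        rw [List.getD_eq_getElem?_getD, List.getElem?_map, List.getElem?_range (by omega)]
        simp only [Option.map_some, Option.getD_some]
        congr 1
        omega
      have estep : ∀ (s j : Int), 1 ≤ j → j ≤ 6 →
          (if 0 ≤ i - j then s + PySem.List.pyGetD val (i - j) 0 else s)
            = s + gpure dp (i - j) := by
        intro s j hj1 hj2
        by_cases hc : 0 ≤ i - j
        · rw [if_pos hc, hvget (i - j) hc (by omega)]
        · rw [if_neg hc, gpure]
          simp [show i - j < 0 by omega]
      have h0 : ¬ i < 0 := by omega
      have h1 : ¬ i = 0 := by omega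
      have hrange7 : PySem.List.pyRange 1 7 1 = [1, 2, 3, 4, 5, 6] := by decide
      have hlast : List.range (m + 1 + 1) = List.range (m + 1) ++ [m + 1] := List.range_succ
      rw [hlast, List.map_append]
      simp only [List.map_cons, List.map_nil]
      rw [← hval]
      congr 1
      -- the appended element equals gpure dp i
      have hieq : ((m + 1 : Nat) : Int) = i := by rw [hi]; push_cast; ring_nf
      rw [hieq]
      by_cases hv : PySem.List.pyGetD dp i 0 = -1
      · rw [if_pos hv]
        rw [hrange7]
        simp only [List.foldl_cons, List.foldl_nil]
        rw [estep _ 1 (by norm_num) (by norm_num), estep _ 2 (by norm_num) (by norm_num),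
            estep _ 3 (by norm_num) (by norm_num), estep _ 4 (by norm_num) (by norm_num),
            estep _ 5 (by norm_num) (by norm_num), estep _ 6 (by norm_num) (by norm_num)]
        rw [gpure_of_uncached dp i h0 h1 (by rwa [← pyGetD_nonneg_getD dp i 0 (by omega)])]
        simp only [zero_add]
      · rw [if_neg hv]
        rw [gpure_of_cached dp i h0 h1 (by rwa [← pyGetD_nonneg_getD dp i 0 (by omega)]),
            pyGetD_nonneg_getD dp i 0 (by omega)]

lemma alt_eq_gpure (num : Int) (dp : List Int) :
    dice_combinations_alt num dp = gpure dp num := by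
  rw [dice_combinations_alt]
  by_cases h0 : num < 0
  · rw [if_pos h0, gpure]; simp [h0]
  · rw [if_neg h0]
    have hnum : num = ((num.toNat : Nat) : Int) := by omega
    rw [hnum, foldB dp num.toNat]
    rw [pyGetD_nonneg_getD _ _ _ (by omega)]
    rw [List.getD_eq_getElem?_getD, List.getElem?_map,
        List.getElem?_range (by omega)]
    simp

-- ===== VERDICT (by name: the statement is the Claim_ definition above) =====
theorem dice_combinations_spec : Claim_equal_dice_combinations := by
  intro num dp _ _
  unfold Spec_dice_combinations
  rw [alt_eq_gpure]
  have hx : MemoExt dp dp := ⟨rfl, fun k _ => Or.inl rfl⟩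
  exact ((diceAuxA_eq dp num.toNat num dp le_rfl hx).1 : _)
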